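-- pv_equiv track=rewrite | github.com/ichikawa85/lol-sim | modules/get-data/plot_fig_ar.py | w_damage
-- ===== SOURCE A (Python) =====
-- def w_damage(lv):
--     skill_level=0
--     get_w_level=[2,8,10,12,13]
--     w_damage_list = [90,135,180,225,270]
--     for level in get_w_level:
--         if lv >= level:
--             skill_level+=1
--
--     if skill_level == 0:
--         return 0
--     else:
--         return w_damage_list[skill_level-1]
-- ===== SOURCE B (Python) =====
-- def w_damage(lv):
--     if lv < 2:
--         return 0
--     elif lv < 8:
--         return 90
--     elif lv < 10:
--         return 135
--     elif lv < 12: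
--         return 180
--     elif lv < 13:
--         return 225
--     else:
--         return 270
-- ===== Notes on version B (the rewrite author's own statement) =====
-- stated objective: simpler
-- what changed: Replaces the counting loop over the threshold list plus damage-table index with a direct if/elif cascade returning the damage for the interval lv falls in.
import Mathlib
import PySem

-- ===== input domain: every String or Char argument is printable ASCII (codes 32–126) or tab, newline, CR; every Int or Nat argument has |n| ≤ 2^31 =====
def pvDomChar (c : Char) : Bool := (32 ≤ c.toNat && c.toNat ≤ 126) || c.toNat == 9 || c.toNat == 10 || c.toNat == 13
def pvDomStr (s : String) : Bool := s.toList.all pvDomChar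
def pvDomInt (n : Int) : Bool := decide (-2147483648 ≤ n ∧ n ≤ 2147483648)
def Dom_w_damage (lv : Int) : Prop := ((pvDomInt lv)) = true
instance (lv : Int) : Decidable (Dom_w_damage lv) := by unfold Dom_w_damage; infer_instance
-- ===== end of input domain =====

-- B replaces A's counting loop + table lookup with a direct if/elif cascade (simpler).

-- ===== PORT A =====
def w_damage (lv : Int) : Int :=
  let skill_level : Int := 0
  let get_w_level : List Int := [2, 8, 10, 12, 13]
  let w_damage_list : List Int := [90, 135, 180, 225, 270]
  let skill_level := get_w_level.foldl
    (fun acc level => if lv ≥ level then acc + 1 else acc) skill_level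
  if skill_level = 0 then 0
  else (PySem.List.pyGet? w_damage_list (skill_level - 1)).getD 0  -- index is always in range here

-- ===== PORT B =====
def w_damage_alt (lv : Int) : Int :=
  if lv < 2 then 0
  else if lv < 8 then 90
  else if lv < 10 then 135
  else if lv < 12 then 180
  else if lv < 13 then 225
  else 270

-- ===== PRECONDITION & SPEC =====
def Spec_w_damage (lv : Int) (out : Int) : Prop := out = w_damage_alt lv
instance (lv : Int) (out : Int) : Decidable (Spec_w_damage lv out) := by unfold Spec_w_damage; infer_instance

-- ===== CLAIM (what is proved, stated in full; the proofs are below) =====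
def Claim_equal_w_damage : Prop := ∀ (lv : Int), Dom_w_damage lv → Spec_w_damage lv (w_damage lv)

-- ===== LEMMAS AND PROOFS =====

-- ===== VERDICT (by name: the statement is the Claim_ definition above) =====
theorem w_damage_spec : Claim_equal_w_damage := by
  intro lv _
  unfold Spec_w_damage w_damage w_damage_alt
  simp only [List.foldl, ge_iff_le]
  by_cases h1 : (2:Int) ≤ lv <;> by_cases h2 : (8:Int) ≤ lv <;> by_cases h3 : (10:Int) ≤ lv <;>
    by_cases h4 : (12:Int) ≤ lv <;> by_cases h5 : (13:Int) ≤ lv <;>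
    simp only [h1, h2, h3, h4, h5, if_true, if_false] <;>
    norm_num [PySem.List.pyGet?, PySem.List.pyIdx?, List.getElem_cons_succ,
      List.getElem_cons_zero, show Int.toNat 2 = 2 from rfl, show Int.toNat 3 = 3 from rfl,
      show Int.toNat 4 = 4 from rfl] <;> omega
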